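-- pv_equiv track=rewrite | github.com/BrayanKellyBalbuena/Programacion-I-ITLA- | Fundamento Programacion/Tarea  4 desiciones/7.py | Proce
-- ===== SOURCE A (Python) =====
-- def Proce(num):
--    if num < 0 :
--       num1 = num * (-1)
--    num1 = num
--    x =int(0)
--    p =int(1)
--    while p <= num1:
--       if num1 % p == 0:
--          x += int(1)
--       p += 1
--    if x > 2 and num < 0:
--       pri = "no es primo pero es negativo"
--       return pri
--    elif x == 2 and num < 0:
--       pri = " es primo y  es positivo"
--       return pri
--    elif x > 2 and num > 0:
--       pri = " es primo pero es positivo"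
--       return pri
--    else:
--       pri = " es primo pero es negativo"
--       return pri
-- ===== SOURCE B (Python) =====
-- def Proce(num):
--     # early-exit trial division up to sqrt(num): a nontrivial divisor exists
--     # exactly when A's divisor count exceeds 2
--     if num > 1:
--         d = 2
--         while d * d <= num:
--             if num % d == 0:
--                 return " es primo pero es positivo"
--             d += 1
--     return " es primo pero es negativo"
-- ===== Notes on version B (the rewrite author's own statement) =====
-- stated objective: faster
-- what changed: A counts all divisors of num with a full scan from one to num and then classifies on the count; B instead runs an early-exit trial-division search for a nontrivial divisor no larger than sqrt(num), exploiting that A's divisor count exceeds two exactly when such a divisor exists.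
import Mathlib
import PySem

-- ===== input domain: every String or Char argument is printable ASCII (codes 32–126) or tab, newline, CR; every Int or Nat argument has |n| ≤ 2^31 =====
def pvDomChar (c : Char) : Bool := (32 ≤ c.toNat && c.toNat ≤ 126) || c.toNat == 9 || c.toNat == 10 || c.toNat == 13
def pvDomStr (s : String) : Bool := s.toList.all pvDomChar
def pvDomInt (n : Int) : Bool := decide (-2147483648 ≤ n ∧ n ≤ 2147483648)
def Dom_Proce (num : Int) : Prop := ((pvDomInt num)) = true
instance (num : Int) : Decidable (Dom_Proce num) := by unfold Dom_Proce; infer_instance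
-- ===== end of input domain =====

-- B replaces A's full divisor-count scan from 1 to num by an early-exit trial division
-- up to sqrt(num); objective: faster (asymptotic, O(sqrt n) vs O(n)).

-- ===== PORT A =====
-- the while loop: p counts up from 1 to num1, x counts divisors
def ProceLoop (num1 x p : Int) : Int :=
  if p ≤ num1 then
    ProceLoop num1 (if PySem.Int.mod num1 p == 0 then x + 1 else x) (p + 1)
  else x
termination_by (num1 + 1 - p).toNat
decreasing_by omega

def Proce (num : Int) : String :=
  -- Python's 'if num < 0: num1 = num * (-1)' is dead: num1 is unconditionally reassigned to num
  let num1 := num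
  let x := ProceLoop num1 0 1
  if x > 2 ∧ num < 0 then "no es primo pero es negativo"
  else if x = 2 ∧ num < 0 then " es primo y  es positivo"
  else if x > 2 ∧ num > 0 then " es primo pero es positivo"
  else " es primo pero es negativo"

-- ===== PORT B =====
theorem proceAlt_dec (num d : Int) (h : d * d ≤ num) :
    (num + 1 - (d + 1)).toNat < (num + 1 - d).toNat := by
  have hd : d ≤ d * d := by
    rcases le_or_gt d 0 with h0 | h0
    · nlinarith
    · nlinarith
  omega

def ProceAltLoop (num d : Int) : String :=
  if h : d * d ≤ num then
    if PySem.Int.mod num d == 0 then " es primo pero es positivo"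
    else ProceAltLoop num (d + 1)
  else " es primo pero es negativo"
termination_by (num + 1 - d).toNat
decreasing_by exact proceAlt_dec num d h

def Proce_alt (num : Int) : String :=
  if num > 1 then ProceAltLoop num 2
  else " es primo pero es negativo"

-- ===== PRECONDITION & SPEC =====
def Spec_Proce (num : Int) (out : String) : Prop := out = Proce_alt num
instance (num : Int) (out : String) : Decidable (Spec_Proce num out) := by unfold Spec_Proce; infer_instance

-- ===== CLAIM (what is proved, stated in full; the proofs are below) =====
def Claim_equal_Proce : Prop := ∀ (num : Int), Dom_Proce num → Spec_Proce num (Proce num)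

-- ===== LEMMAS AND PROOFS =====

-- A's loop computes the number of divisors of num1 in [p, num1]
theorem proceLoop_eq (num1 x p : Int) :
    ProceLoop num1 x p =
      x + (((Finset.Icc p num1).filter (fun q => PySem.Int.mod num1 q = 0)).card : Int) := by
  fun_induction ProceLoop num1 x p with
  | case1 x p h ih =>
    have hins : Finset.Icc p num1 = insert p (Finset.Icc (p + 1) num1) := by
      rw [← Order.succ_eq_add_one, Finset.insert_Icc_succ_left_eq_Icc h]
    have hnot : p ∉ (Finset.Icc (p + 1) num1).filter (fun q => PySem.Int.mod num1 q = 0) := by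
      simp [Finset.mem_Icc]
    simp only [dite_eq_ite] at ih
    rw [ih, hins, Finset.filter_insert]
    by_cases hm : PySem.Int.mod num1 p = 0
    · rw [if_pos hm, Finset.card_insert_of_notMem hnot, if_pos (by simp [hm])]
      push_cast; ring
    · simp [hm]
  | case2 x p h =>
    have : Finset.Icc p num1 = ∅ := Finset.Icc_eq_empty (by omega)
    simp [this]

-- divisor count > 2 ↔ a nontrivial divisor exists (for num ≥ 1)
theorem count_gt_two_iff (n : Int) (hn : 1 ≤ n) :
    ProceLoop n 0 1 > 2 ↔ ∃ d : Int, 1 < d ∧ d < n ∧ d ∣ n := by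
  rw [proceLoop_eq]
  set D := (Finset.Icc 1 n).filter (fun q => PySem.Int.mod n q = 0) with hD
  constructor
  · intro hcard
    by_contra hno
    push Not at hno
    have hsub : D ⊆ ({1, n} : Finset Int) := by
      intro d hd
      rw [hD, Finset.mem_filter, Finset.mem_Icc] at hd
      obtain ⟨⟨h1, h2⟩, hm⟩ := hd
      have hdvd : d ∣ n := (PySem.Int.mod_eq_zero_iff_dvd n d).mp hm
      simp only [Finset.mem_insert, Finset.mem_singleton]
      by_contra hne
      push Not at hne
      exact absurd (hno d (by omega) (by omega)) (fun hc => hc hdvd)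
    have := Finset.card_le_card hsub
    have h2 : ({1, n} : Finset Int).card ≤ 2 := Finset.card_insert_le 1 {n} |>.trans (by simp)
    omega
  · rintro ⟨d, hd1, hdn, hdvd⟩
    have hmem1 : (1 : Int) ∈ D := by
      rw [hD, Finset.mem_filter, Finset.mem_Icc]
      exact ⟨⟨le_refl _, hn⟩, (PySem.Int.mod_eq_zero_iff_dvd n 1).mpr (one_dvd n)⟩
    have hmemn : n ∈ D := by
      rw [hD, Finset.mem_filter, Finset.mem_Icc]
      exact ⟨⟨hn, le_refl _⟩, (PySem.Int.mod_eq_zero_iff_dvd n n).mpr dvd_rfl⟩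
    have hmemd : d ∈ D := by
      rw [hD, Finset.mem_filter, Finset.mem_Icc]
      exact ⟨⟨by omega, by omega⟩, (PySem.Int.mod_eq_zero_iff_dvd n d).mpr hdvd⟩
    have hsub : ({1, d, n} : Finset Int) ⊆ D := by
      intro q hq
      simp only [Finset.mem_insert, Finset.mem_singleton] at hq
      rcases hq with rfl | rfl | rfl <;> assumption
    have hcard3 : ({1, d, n} : Finset Int).card = 3 := by
      rw [Finset.card_insert_of_notMem (by simp; omega),
          Finset.card_insert_of_notMem (by simp; omega), Finset.card_singleton]
    have := Finset.card_le_card hsub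
    omega

-- a nontrivial divisor exists ↔ one exists below sqrt (for num > 1)
theorem sqrt_divisor_iff (n : Int) (hn : 1 < n) :
    (∃ d : Int, 1 < d ∧ d < n ∧ d ∣ n) ↔ (∃ d : Int, 2 ≤ d ∧ d * d ≤ n ∧ d ∣ n) := by
  constructor
  · rintro ⟨d, hd1, hdn, hdvd⟩
    by_cases hsq : d * d ≤ n
    · exact ⟨d, by omega, hsq, hdvd⟩
    · obtain ⟨e, he⟩ := hdvd
      have hd0 : 0 < d := by omega
      have he0 : 0 < e := by nlinarith
      have he2 : 2 ≤ e := by nlinarith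
      have hee : e * e ≤ n := by nlinarith
      exact ⟨e, he2, hee, Dvd.intro d (by linarith [he.symm]; )⟩
  · rintro ⟨d, hd2, hsq, hdvd⟩
    exact ⟨d, by omega, by nlinarith, hdvd⟩

-- B's loop returns "positivo" iff some q ≥ d with q*q ≤ num divides num
theorem altLoop_pos_iff (num d : Int) (hd : 1 ≤ d) :
    ProceAltLoop num d = " es primo pero es positivo" ↔
      ∃ q : Int, d ≤ q ∧ q * q ≤ num ∧ q ∣ num := by
  fun_induction ProceAltLoop num d with
  | case1 d h hm =>
    simp only [beq_iff_eq] at hm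
    exact ⟨fun _ => ⟨d, le_refl _, h, (PySem.Int.mod_eq_zero_iff_dvd num d).mp hm⟩, fun _ => rfl⟩
  | case2 d h hm ih =>
    simp only [beq_iff_eq] at hm
    rw [ih (by omega)]
    constructor
    · rintro ⟨q, hq, hqq, hqd⟩; exact ⟨q, by omega, hqq, hqd⟩
    · rintro ⟨q, hq, hqq, hqd⟩
      refine ⟨q, ?_, hqq, hqd⟩
      rcases eq_or_lt_of_le hq with rfl | h'
      · exact absurd ((PySem.Int.mod_eq_zero_iff_dvd num d).mpr hqd) hm
      · omega
  | case3 d h =>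
    constructor
    · intro hc; exact absurd hc (by decide)
    · rintro ⟨q, hq, hqq, _⟩
      exfalso
      have h1 : d * d ≤ q * q := by nlinarith
      omega

theorem altLoop_cases (num d : Int) :
    ProceAltLoop num d = " es primo pero es positivo" ∨
    ProceAltLoop num d = " es primo pero es negativo" := by
  fun_induction ProceAltLoop num d with
  | case1 d h hm => left; rfl
  | case2 d h hm ih => exact ih
  | case3 d h => right; rfl

-- ===== VERDICT (by name: the statement is the Claim_ definition above) =====
theorem Proce_spec : Claim_equal_Proce := by
  intro num _
  unfold Spec_Proce Proce Proce_alt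
  by_cases hpos : 1 < num
  · -- num ≥ 2
    have hx : ProceLoop num 0 1 > 2 ↔ ∃ d : Int, 2 ≤ d ∧ d * d ≤ num ∧ d ∣ num := by
      rw [count_gt_two_iff num (by omega), sqrt_divisor_iff num hpos]
    rw [if_pos hpos]
    by_cases hdiv : ∃ d : Int, 2 ≤ d ∧ d * d ≤ num ∧ d ∣ num
    · have hgt : ProceLoop num 0 1 > 2 := hx.mpr hdiv
      rw [if_neg (by omega), if_neg (by omega), if_pos ⟨hgt, by omega⟩]
      exact ((altLoop_pos_iff num 2 (by omega)).mpr (by obtain ⟨d, h1, h2, h3⟩ := hdiv; exact ⟨d, h1, h2, h3⟩)).symm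
    · have hle : ¬ ProceLoop num 0 1 > 2 := fun hc => hdiv (hx.mp hc)
      rw [if_neg (by omega), if_neg (by omega), if_neg (by omega)]
      rcases altLoop_cases num 2 with hc | hc
      · exact absurd ((altLoop_pos_iff num 2 (by omega)).mp hc) hdiv
      · exact hc.symm
  · -- num ≤ 1: A's x ≤ 1, so A falls through to the last branch; B skips the loop
    rw [if_neg hpos]
    have hx : ProceLoop num 0 1 ≤ 1 := by
      by_cases h1 : (1 : Int) ≤ num
      · have hn1 : num = 1 := by omega
        subst hn1
        rw [proceLoop_eq]
        have hle : ((Finset.Icc (1:Int) 1).filter (fun q => PySem.Int.mod 1 q = 0)).card ≤ (Finset.Icc (1:Int) 1).card := Finset.card_filter_le _ _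
        have h2 : (Finset.Icc (1:Int) 1).card = 1 := by simp
        omega
      · rw [ProceLoop, if_neg (by omega)]; omega
    rw [if_neg (by omega), if_neg (by rintro ⟨h, _⟩; omega), if_neg (by omega)]
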